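-- pv_equiv track=rewrite | github.com/vvijay2468/IPTV_scraper | validation/classify.py | classify_url
-- ===== SOURCE A (Python) =====
-- def classify_url(url: str) -> str:
--     url = url.lower()
--
--     if url.endswith(".m3u8"):
--         return "STREAM_HLS"
--
--     if url.endswith(".mpd"):
--         return "STREAM_DASH"
--
--     if any(url.endswith(ext) for ext in [".png", ".jpg", ".jpeg", ".svg", ".gif"]):
--         return "STATIC_ASSET"
--
--     return "UNKNOWN"
-- ===== SOURCE B (Python) =====
-- _EXT_MAP = {
--     "m3u8": "STREAM_HLS",
--     "mpd": "STREAM_DASH",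
--     "png": "STATIC_ASSET",
--     "jpg": "STATIC_ASSET",
--     "jpeg": "STATIC_ASSET",
--     "svg": "STATIC_ASSET",
--     "gif": "STATIC_ASSET",
-- }
--
--
-- def classify_url(url: str) -> str:
--     _head, sep, ext = url.lower().rpartition(".")
--     if not sep:
--         return "UNKNOWN"
--     return _EXT_MAP.get(ext, "UNKNOWN")
-- ===== Notes on version B (the rewrite author's own statement) =====
-- stated objective: idiomatic
-- what changed: Replaces the chain of endswith scans with one extraction of the final dot-separated extension (rpartition) followed by a single dict lookup.
import Mathlib
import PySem

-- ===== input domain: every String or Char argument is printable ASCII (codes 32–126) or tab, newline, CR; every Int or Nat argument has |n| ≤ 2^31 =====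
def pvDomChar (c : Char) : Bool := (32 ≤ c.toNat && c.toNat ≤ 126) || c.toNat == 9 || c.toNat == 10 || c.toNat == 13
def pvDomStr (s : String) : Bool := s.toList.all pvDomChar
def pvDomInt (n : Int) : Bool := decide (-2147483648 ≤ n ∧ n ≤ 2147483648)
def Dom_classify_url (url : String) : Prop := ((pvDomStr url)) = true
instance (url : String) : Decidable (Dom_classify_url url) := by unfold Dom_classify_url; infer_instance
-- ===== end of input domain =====

-- B replaces A's chain of endswith checks by one rpartition extension extraction plus a dict lookup (idiomatic).


-- ===== PORT A =====
def classify_url (url : String) : String :=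
  let url := PySem.Str.lower url
  if PySem.Str.endswith url ".m3u8" then "STREAM_HLS"
  else if PySem.Str.endswith url ".mpd" then "STREAM_DASH"
  else if [".png", ".jpg", ".jpeg", ".svg", ".gif"].any (fun ext => PySem.Str.endswith url ext) then
    "STATIC_ASSET"
  else "UNKNOWN"

-- ===== PORT B =====
def pvExtMap : PySem.Dict String String :=
  PySem.Dict.ofList [("m3u8", "STREAM_HLS"), ("mpd", "STREAM_DASH"),
    ("png", "STATIC_ASSET"), ("jpg", "STATIC_ASSET"), ("jpeg", "STATIC_ASSET"),
    ("svg", "STATIC_ASSET"), ("gif", "STATIC_ASSET")]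

def classify_url_alt (url : String) : String :=
  -- url.lower().rpartition on the dot: hand port, exact — sep is nonempty iff a dot occurs in the
  -- string; ext is the run of characters after the LAST dot (reverse, takeWhile, reverse).
  let cs := (PySem.Str.lower url).toList
  if cs.contains '.' then
    let ext := String.ofList ((cs.reverse.takeWhile (fun c => c ≠ '.')).reverse)
    pvExtMap.getD ext "UNKNOWN"
  else "UNKNOWN"

-- ===== PRECONDITION & SPEC =====
def Spec_classify_url (url : String) (out : String) : Prop := out = classify_url_alt url
instance (url : String) (out : String) : Decidable (Spec_classify_url url out) := by unfold Spec_classify_url; infer_instance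

-- ===== CLAIM (what is proved, stated in full; the proofs are below) =====
def Claim_equal_classify_url : Prop := ∀ (url : String), Dom_classify_url url → Spec_classify_url url (classify_url url)

-- ===== LEMMAS AND PROOFS =====

-- takeWhile over a block of chars all ≠ '.' followed by '.'
theorem pv_takeWhile_append (t rest : List Char) (ht : ∀ c ∈ t, c ≠ '.') :
    (t ++ '.' :: rest).takeWhile (fun c => c ≠ '.') = t := by
  induction t with
  | nil => rw [List.nil_append, List.takeWhile_cons_of_neg (by simp)]
  | cons a t ih =>
    have ha : a ≠ '.' := ht a (by simp)
    rw [List.cons_append, List.takeWhile_cons_of_pos (by simp [ha]),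
      ih (fun c hc => ht c (by simp [hc]))]

-- a list containing '.' decomposes at its FIRST '.'
theorem pv_decomp (r : List Char) (h : '.' ∈ r) :
    r = r.takeWhile (fun c => c ≠ '.') ++ '.' :: (r.dropWhile (fun c => c ≠ '.')).tail := by
  induction r with
  | nil => simp at h
  | cons a r ih =>
    by_cases ha : a = '.'
    · subst ha; simp [List.takeWhile, List.dropWhile]
    · have hm : '.' ∈ r := by
        cases List.mem_cons.mp h with
        | inl h1 => exact absurd h1.symm ha
        | inr h1 => exact h1
      rw [List.takeWhile_cons_of_pos (by simp [ha]), List.dropWhile_cons_of_pos (by simp [ha]),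
        List.cons_append]
      exact congrArg (a :: ·) (ih hm)

-- the key characterisation: a suffix '.'++e (with '.' ∉ e) exists iff the string has a dot
-- and the run after the last dot is exactly e
theorem pv_key (cs e : List Char) (he : ∀ c ∈ e, c ≠ '.') :
    ('.' :: e <:+ cs) ↔ ('.' ∈ cs ∧ (cs.reverse.takeWhile (fun c => c ≠ '.')).reverse = e) := by
  constructor
  · rintro ⟨pre, hpre⟩
    constructor
    · rw [← hpre]; simp
    · have hrev : cs.reverse = e.reverse ++ '.' :: pre.reverse := by
        rw [← hpre]; simp
      rw [hrev, pv_takeWhile_append e.reverse pre.reverse (fun c hc => he c (by simpa using hc))]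
      simp
  · rintro ⟨hdot, hext⟩
    have hdotr : '.' ∈ cs.reverse := by simpa using hdot
    have hd := pv_decomp cs.reverse hdotr
    refine ⟨((cs.reverse.dropWhile (fun c => c ≠ '.')).tail).reverse, ?_⟩
    have hcs : cs = (((cs.reverse.dropWhile (fun c => c ≠ '.')).tail).reverse) ++
        '.' :: (cs.reverse.takeWhile (fun c => c ≠ '.')).reverse := by
      conv_lhs => rw [← cs.reverse_reverse, hd]
      simp
    conv_rhs => rw [hcs]
    rw [hext]

-- no dot in the string ⇒ no suffix of the form '.'++e
theorem pv_no_dot_no_suffix (cs e : List Char) (h : ¬ '.' ∈ cs) : ¬ ('.' :: e <:+ cs) := by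
  rintro ⟨pre, hpre⟩
  exact h (by rw [← hpre]; simp)

theorem pv_endswith_char (u : String) (e : List Char) (he : ∀ c ∈ e, c ≠ '.') (p : String)
    (hp : p.toList = '.' :: e) :
    PySem.Str.endswith u p = true ↔
      ('.' ∈ u.toList ∧ (u.toList.reverse.takeWhile (fun c => c ≠ '.')).reverse = e) := by
  rw [PySem.Str.endswith_eq, PySem.Chars.endswith_iff, hp]
  exact pv_key u.toList e he

-- ===== VERDICT (by name: the statement is the Claim_ definition above) =====
set_option maxRecDepth 4000 in
set_option maxHeartbeats 1000000 in
theorem classify_url_spec : Claim_equal_classify_url := by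
  intro url _hdom
  unfold Spec_classify_url classify_url classify_url_alt
  set u := PySem.Str.lower url with hu
  by_cases hdot : '.' ∈ u.toList
  · -- there is a dot: every endswith test is "ext = that literal"
    simp only [List.contains_eq_mem, hdot, decide_true, if_true]
    set ext := (u.toList.reverse.takeWhile (fun c => c ≠ '.')).reverse with hext
    have h1 : PySem.Str.endswith u ".m3u8" = true ↔ ext = "m3u8".toList :=
      (pv_endswith_char u "m3u8".toList (by simp) ".m3u8" (by rfl)).trans (and_iff_right hdot)
    have h2 : PySem.Str.endswith u ".mpd" = true ↔ ext = "mpd".toList :=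
      (pv_endswith_char u "mpd".toList (by simp) ".mpd" (by rfl)).trans (and_iff_right hdot)
    have h3 : PySem.Str.endswith u ".png" = true ↔ ext = "png".toList :=
      (pv_endswith_char u "png".toList (by simp) ".png" (by rfl)).trans (and_iff_right hdot)
    have h4 : PySem.Str.endswith u ".jpg" = true ↔ ext = "jpg".toList :=
      (pv_endswith_char u "jpg".toList (by simp) ".jpg" (by rfl)).trans (and_iff_right hdot)
    have h5 : PySem.Str.endswith u ".jpeg" = true ↔ ext = "jpeg".toList :=
      (pv_endswith_char u "jpeg".toList (by simp) ".jpeg" (by rfl)).trans (and_iff_right hdot)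
    have h6 : PySem.Str.endswith u ".svg" = true ↔ ext = "svg".toList :=
      (pv_endswith_char u "svg".toList (by simp) ".svg" (by rfl)).trans (and_iff_right hdot)
    have h7 : PySem.Str.endswith u ".gif" = true ↔ ext = "gif".toList :=
      (pv_endswith_char u "gif".toList (by simp) ".gif" (by rfl)).trans (and_iff_right hdot)
    have hstat : ([".png", ".jpg", ".jpeg", ".svg", ".gif"].any
        (fun ext => PySem.Str.endswith u ext)) = true ↔
        (ext = "png".toList ∨ ext = "jpg".toList ∨ ext = "jpeg".toList ∨
          ext = "svg".toList ∨ ext = "gif".toList) := by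
      simp only [List.any_cons, List.any_nil, Bool.or_eq_true, Bool.false_eq_true, or_false,
        h3, h4, h5, h6, h7]
    have hmk : ∀ (s : String), String.ofList ext = s ↔ ext = s.toList := by
      intro s; constructor
      · intro h; rw [← h]; simp
      · intro h; rw [h]; simp
    by_cases c1 : ext = "m3u8".toList
    · rw [if_pos (h1.mpr c1), (hmk "m3u8").mpr c1]
      rfl
    by_cases c2 : ext = "mpd".toList
    · rw [if_neg (fun h => c1 (h1.mp h)), if_pos (h2.mpr c2), (hmk "mpd").mpr c2]
      rfl
    by_cases c3 : ext = "png".toList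
    · rw [if_neg (fun h => c1 (h1.mp h)), if_neg (fun h => c2 (h2.mp h)),
        if_pos (hstat.mpr (Or.inl c3)), (hmk "png").mpr c3]
      rfl
    by_cases c4 : ext = "jpg".toList
    · rw [if_neg (fun h => c1 (h1.mp h)), if_neg (fun h => c2 (h2.mp h)),
        if_pos (hstat.mpr (Or.inr (Or.inl c4))), (hmk "jpg").mpr c4]
      rfl
    by_cases c5 : ext = "jpeg".toList
    · rw [if_neg (fun h => c1 (h1.mp h)), if_neg (fun h => c2 (h2.mp h)),
        if_pos (hstat.mpr (Or.inr (Or.inr (Or.inl c5)))), (hmk "jpeg").mpr c5]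
      rfl
    by_cases c6 : ext = "svg".toList
    · rw [if_neg (fun h => c1 (h1.mp h)), if_neg (fun h => c2 (h2.mp h)),
        if_pos (hstat.mpr (Or.inr (Or.inr (Or.inr (Or.inl c6))))), (hmk "svg").mpr c6]
      rfl
    by_cases c7 : ext = "gif".toList
    · rw [if_neg (fun h => c1 (h1.mp h)), if_neg (fun h => c2 (h2.mp h)),
        if_pos (hstat.mpr (Or.inr (Or.inr (Or.inr (Or.inr c7))))), (hmk "gif").mpr c7]
      rfl
    · -- ext matches no key: the if-chain falls through and the lookup misses
      have e1 : ("m3u8" == String.ofList ext) = false :=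
        beq_eq_false_iff_ne.mpr (fun h => c1 ((hmk "m3u8").mp h.symm))
      have e2 : ("mpd" == String.ofList ext) = false :=
        beq_eq_false_iff_ne.mpr (fun h => c2 ((hmk "mpd").mp h.symm))
      have e3 : ("png" == String.ofList ext) = false :=
        beq_eq_false_iff_ne.mpr (fun h => c3 ((hmk "png").mp h.symm))
      have e4 : ("jpg" == String.ofList ext) = false :=
        beq_eq_false_iff_ne.mpr (fun h => c4 ((hmk "jpg").mp h.symm))
      have e5 : ("jpeg" == String.ofList ext) = false :=
        beq_eq_false_iff_ne.mpr (fun h => c5 ((hmk "jpeg").mp h.symm))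
      have e6 : ("svg" == String.ofList ext) = false :=
        beq_eq_false_iff_ne.mpr (fun h => c6 ((hmk "svg").mp h.symm))
      have e7 : ("gif" == String.ofList ext) = false :=
        beq_eq_false_iff_ne.mpr (fun h => c7 ((hmk "gif").mp h.symm))
      have hnone : pvExtMap.get? (String.ofList ext) = none := by
        have hmkd : pvExtMap = PySem.Dict.mk [("m3u8", "STREAM_HLS"), ("mpd", "STREAM_DASH"),
            ("png", "STATIC_ASSET"), ("jpg", "STATIC_ASSET"), ("jpeg", "STATIC_ASSET"),
            ("svg", "STATIC_ASSET"), ("gif", "STATIC_ASSET")] := rfl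
        rw [hmkd]
        simp [e1, e2, e3, e4, e5, e6, e7, PySem.Dict.get?]
      rw [if_neg (fun h => c1 (h1.mp h)), if_neg (fun h => c2 (h2.mp h)),
        if_neg (fun h => by
          rcases hstat.mp h with h' | h' | h' | h' | h'
          exacts [c3 h', c4 h', c5 h', c6 h', c7 h'])]
      simp [PySem.Dict.getD, hnone]
  · -- no dot: every endswith test is false, both sides return "UNKNOWN"
    have hf : ∀ (e : List Char), PySem.Chars.endswith u.toList ('.' :: e) = false := by
      intro e
      apply Bool.eq_false_iff.mpr
      intro h
      exact pv_no_dot_no_suffix u.toList e hdot ((PySem.Chars.endswith_iff _ _).mp h)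
    simp [List.contains_eq_mem, hdot,
      show PySem.Chars.endswith u.toList ['.','m','3','u','8'] = false from hf _,
      show PySem.Chars.endswith u.toList ['.','m','p','d'] = false from hf _,
      show PySem.Chars.endswith u.toList ['.','p','n','g'] = false from hf _,
      show PySem.Chars.endswith u.toList ['.','j','p','g'] = false from hf _,
      show PySem.Chars.endswith u.toList ['.','j','p','e','g'] = false from hf _,
      show PySem.Chars.endswith u.toList ['.','s','v','g'] = false from hf _,
      show PySem.Chars.endswith u.toList ['.','g','i','f'] = false from hf _]
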